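-- pv_equiv track=rewrite | github.com/zevaverbach/kindchess | zevchess/commands.py | get_updated_FEN_dest_rank
-- ===== SOURCE A (Python) =====
-- BLANK = "BLANK"
--
-- def split_FEN_into_tokens(fen: str) -> list[str]:
--     tokens = []
--     for char in fen:
--         if char.isnumeric():
--             for _ in range(int(char)):
--                 tokens.append(BLANK)
--         else:
--             tokens.append(char)
--     return tokens
--
-- def create_FEN_from_tokens(tokens: list[str]) -> str:
--     FEN = ""
--     num_blanks = 0
--     for tok in tokens:
--         if tok == BLANK:
--             num_blanks += 1
--             continue
--         if num_blanks > 0: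
--             FEN += str(num_blanks)
--             num_blanks = 0
--         FEN += tok
--     if num_blanks > 0:
--         FEN += str(num_blanks)
--     return FEN
--
-- def get_updated_FEN_dest_rank(fen, dest_file_idx, piece: str) -> str:
--     tokens_dest = split_FEN_into_tokens(fen)
--     updated_rank = []
--
--     for idx, token in enumerate(tokens_dest):
--         if idx == dest_file_idx:
--             updated_rank.append(piece)
--         else:
--             updated_rank.append(token)
--     return create_FEN_from_tokens(updated_rank)
-- ===== SOURCE B (Python) =====
-- BLANK = "BLANK"
--
-- def get_updated_FEN_dest_rank(fen, dest_file_idx, piece: str) -> str: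
--     out = []
--     pos = 0
--     run = 0
--
--     def emit(tok):
--         nonlocal run
--         if tok == BLANK:
--             run += 1
--         else:
--             if run > 0:
--                 out.append(str(run))
--                 run = 0
--             out.append(tok)
--
--     for ch in fen:
--         if ch.isnumeric():
--             for _ in range(int(ch)):
--                 emit(piece if pos == dest_file_idx else BLANK)
--                 pos += 1
--         else:
--             emit(piece if pos == dest_file_idx else ch)
--             pos += 1
--     if run > 0:
--         out.append(str(run))
--     return "".join(out)
-- ===== Notes on version B (the rewrite author's own statement) =====
-- stated objective: alternative
-- what changed: B replaces A's three-pass pipeline (expand FEN into a BLANK-token list, rebuild the list with the index substituted, recompress the token list) by a single fused pass over the fen string that maintains the expanded position and a pending blank-run count and emits the output directly, never materialising a token list.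
import Mathlib
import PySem

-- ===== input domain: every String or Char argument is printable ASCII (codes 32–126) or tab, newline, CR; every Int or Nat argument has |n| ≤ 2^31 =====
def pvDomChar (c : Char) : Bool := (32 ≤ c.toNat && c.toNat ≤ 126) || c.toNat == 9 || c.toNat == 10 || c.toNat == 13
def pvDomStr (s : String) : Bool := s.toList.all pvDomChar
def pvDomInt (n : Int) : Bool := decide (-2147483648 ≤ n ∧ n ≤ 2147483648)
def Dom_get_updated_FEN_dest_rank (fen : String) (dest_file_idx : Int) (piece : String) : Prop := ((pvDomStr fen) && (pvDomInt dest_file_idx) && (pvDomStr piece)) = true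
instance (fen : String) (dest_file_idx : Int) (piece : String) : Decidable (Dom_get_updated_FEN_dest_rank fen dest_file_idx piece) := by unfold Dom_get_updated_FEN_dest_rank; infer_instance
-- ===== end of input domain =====

-- B fuses A's expand/substitute/recompress three-pass token pipeline into one direct pass
-- over the FEN string with a position counter and a pending blank-run (objective: alternative).


-- ===== PORT A =====
-- split_FEN_into_tokens: 'char.isnumeric()' is exactly '0'..'9' on the ASCII domain (Char.isDigit);
-- int(char) = c.toNat - 48 there.
def pvSplitTokens (fen : String) : List String :=
  fen.toList.foldl (fun tokens c =>
    if c.isDigit then tokens ++ List.replicate (c.toNat - 48) "BLANK"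
    else tokens ++ [c.toString]) []

-- one iteration of create_FEN_from_tokens' loop; the string accumulator is kept as List Char
-- (Python 'FEN += s' ≙ list-of-chars append; String.mk at the end).
def pvCreateStep (acc : List Char × Nat) (tok : String) : List Char × Nat :=
  if tok = "BLANK" then (acc.1, acc.2 + 1)
  else ((if acc.2 > 0 then acc.1 ++ (PySem.Int.toStr acc.2).toList else acc.1) ++ tok.toList, 0)

def pvCreateFlush (st : List Char × Nat) : String :=
  String.ofList (if st.2 > 0 then st.1 ++ (PySem.Int.toStr (st.2 : Int)).toList else st.1)

def pvCreateFEN (tokens : List String) : String :=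
  pvCreateFlush (tokens.foldl pvCreateStep ([], 0))

def get_updated_FEN_dest_rank (fen : String) (dest_file_idx : Int) (piece : String) : String :=
  pvCreateFEN
    (((pvSplitTokens fen).foldl
      (fun (st : Int × List String) token =>
        (st.1 + 1, st.2 ++ [if st.1 = dest_file_idx then piece else token]))
      (0, ([] : List String))).2)

-- ===== PORT B =====
-- emit(tok): flush the pending blank run then append tok, or extend the run.
def pvEmit (out : List Char) (run : Nat) (tok : String) : List Char × Nat :=
  if tok = "BLANK" then (out, run + 1)
  else ((if run > 0 then out ++ (PySem.Int.toStr (run : Int)).toList else out) ++ tok.toList, 0)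

-- one character of B's single pass; state = (pos, out, run).
def pvBStep (dest_file_idx : Int) (piece : String) (st : Int × List Char × Nat) (c : Char) :
    Int × List Char × Nat :=
  if c.isDigit then
    (List.range (c.toNat - 48)).foldl (fun s _ =>
      let e := pvEmit s.2.1 s.2.2 (if s.1 = dest_file_idx then piece else "BLANK")
      (s.1 + 1, e.1, e.2)) st
  else
    let e := pvEmit st.2.1 st.2.2 (if st.1 = dest_file_idx then piece else c.toString)
    (st.1 + 1, e.1, e.2)

-- final flush of the trailing blank run ('if run > 0: out.append(str(run))' + join)
def pvAltFlush (st : Int × List Char × Nat) : String :=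
  String.ofList (if st.2.2 > 0 then st.2.1 ++ (PySem.Int.toStr (st.2.2 : Int)).toList else st.2.1)

def get_updated_FEN_dest_rank_alt (fen : String) (dest_file_idx : Int) (piece : String) : String :=
  pvAltFlush (fen.toList.foldl (pvBStep dest_file_idx piece) (0, [], 0))

-- ===== PRECONDITION & SPEC =====
def Spec_get_updated_FEN_dest_rank (fen : String) (dest_file_idx : Int) (piece : String) (out : String) : Prop := out = get_updated_FEN_dest_rank_alt fen dest_file_idx piece
instance (fen : String) (dest_file_idx : Int) (piece : String) (out : String) : Decidable (Spec_get_updated_FEN_dest_rank fen dest_file_idx piece out) := by unfold Spec_get_updated_FEN_dest_rank; infer_instance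

-- ===== CLAIM (what is proved, stated in full; the proofs are below) =====
def Claim_equal_get_updated_FEN_dest_rank : Prop := ∀ (fen : String) (dest_file_idx : Int) (piece : String), Dom_get_updated_FEN_dest_rank fen dest_file_idx piece → Spec_get_updated_FEN_dest_rank fen dest_file_idx piece (get_updated_FEN_dest_rank fen dest_file_idx piece)

-- ===== LEMMAS AND PROOFS =====

-- expansion of one character into tokens
def pvExpand (c : Char) : List String :=
  if c.isDigit then List.replicate (c.toNat - 48) "BLANK" else [c.toString]

-- index-aware substitution, starting at expanded index i
def pvSub (dest : Int) (piece : String) : Int → List String → List String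
  | _, [] => []
  | i, t :: ts => (if i = dest then piece else t) :: pvSub dest piece (i + 1) ts

theorem pvSplitTokens_eq (fen : String) :
    pvSplitTokens fen = fen.toList.flatMap pvExpand := by
  unfold pvSplitTokens
  have h : (fun (tokens : List String) c =>
      if c.isDigit then tokens ++ List.replicate (c.toNat - 48) "BLANK"
      else tokens ++ [c.toString]) = fun tokens c => tokens ++ pvExpand c := by
    funext tokens c; unfold pvExpand; split_ifs <;> rfl
  rw [h, PySem.List.foldl_append_eq_flatMap]
  simp

theorem pvSubFold (dest piece) : ∀ (toks : List String) (i : Int) (acc : List String),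
    (toks.foldl (fun (st : Int × List String) token =>
      (st.1 + 1, st.2 ++ [if st.1 = dest then piece else token])) (i, acc))
    = (i + toks.length, acc ++ pvSub dest piece i toks)
  | [], i, acc => by simp [pvSub]
  | t :: ts, i, acc => by
    simp only [List.foldl_cons, pvSubFold dest piece ts (i + 1)]
    simp [pvSub]
    omega

theorem pvSub_append (dest piece) : ∀ (xs : List String) (ys : List String) (i : Int),
    pvSub dest piece i (xs ++ ys)
      = pvSub dest piece i xs ++ pvSub dest piece (i + xs.length) ys
  | [], ys, i => by simp [pvSub]
  | x :: xs, ys, i => by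
    simp only [List.cons_append, pvSub, pvSub_append dest piece xs ys (i + 1), List.length_cons]
    congr 3
    push_cast; ring

-- the create-loop state after consuming a list equals foldl pvCreateStep; digit-run lemma
theorem pvRunFold (dest piece) : ∀ (n : Nat) (i : Int) (out : List Char) (run : Nat),
    (List.range n).foldl (fun s _ =>
        let e := pvEmit s.2.1 s.2.2 (if s.1 = dest then piece else "BLANK")
        (s.1 + 1, e.1, e.2)) (i, out, run)
    = (i + n, (pvSub dest piece i (List.replicate n "BLANK")).foldl pvCreateStep (out, run)) := by
  intro n
  induction n with
  | zero => intro i out run; simp [pvSub]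
  | succ n ih =>
    intro i out run
    rw [List.range_succ, List.foldl_append]
    have hrep : List.replicate (n + 1) "BLANK"
        = List.replicate n "BLANK" ++ ["BLANK"] := by
      simp [List.replicate_succ']
    rw [hrep, pvSub_append, List.foldl_append, ih]
    simp [pvSub, pvEmit, pvCreateStep, List.length_replicate]
    omega

theorem pvStep_eq (dest piece) (c : Char) (i : Int) (out : List Char) (run : Nat) :
    pvBStep dest piece (i, out, run) c
      = (i + (pvExpand c).length,
         (pvSub dest piece i (pvExpand c)).foldl pvCreateStep (out, run)) := by
  by_cases h : c.isDigit
  · unfold pvBStep pvExpand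
    simp only [if_pos h]
    rw [pvRunFold]
    simp [List.length_replicate]
  · unfold pvBStep pvExpand
    simp only [if_neg h, pvSub, List.foldl_cons, List.foldl_nil, List.length_cons,
      List.length_nil]
    rfl

theorem pvMain (dest piece) : ∀ (cs : List Char) (i : Int) (out : List Char) (run : Nat),
    cs.foldl (pvBStep dest piece) (i, out, run)
      = (i + (cs.flatMap pvExpand).length,
         (pvSub dest piece i (cs.flatMap pvExpand)).foldl pvCreateStep (out, run))
  | [], i, out, run => by simp [pvSub]
  | c :: cs, i, out, run => by
    rw [List.foldl_cons, pvStep_eq]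
    rw [pvMain dest piece cs]
    rw [List.flatMap_cons, pvSub_append, List.foldl_append]
    refine Prod.ext ?_ rfl
    simp [List.length_append]
    ring

-- ===== VERDICT (by name: the statement is the Claim_ definition above) =====
theorem get_updated_FEN_dest_rank_spec : Claim_equal_get_updated_FEN_dest_rank := by
  intro fen dest piece _
  show _ = _
  unfold get_updated_FEN_dest_rank get_updated_FEN_dest_rank_alt pvCreateFEN pvCreateFlush
    pvAltFlush
  rw [pvSplitTokens_eq, pvSubFold, pvMain]
  simp
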